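-- pv_equiv track=rewrite | github.com/tlucekP/data-explorer | ui/tabs/tab_ai.py | _history_newest_first_with_user_first
-- ===== SOURCE A (Python) =====
-- def _history_newest_first_with_user_first(history: list[dict[str, str]]) -> list[dict[str, str]]:
--     """Show newest turns first while keeping each user prompt above AI replies."""
--     turns: list[list[dict[str, str]]] = []
--     for message in history:
--         if message.get("role") == "user" or not turns:
--             turns.append([message])
--         else:
--             turns[-1].append(message)
--
--     ordered: list[dict[str, str]] = []
--     for turn in reversed(turns):
--         ordered.extend(turn)
--     return ordered
-- ===== SOURCE B (Python) =====
-- def _history_newest_first_with_user_first(history: list[dict[str, str]]) -> list[dict[str, str]]: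
--     """Show newest turns first while keeping each user prompt above AI replies."""
--     out: list[dict[str, str]] = []
--     end = len(history)
--     for i in range(len(history) - 1, 0, -1):
--         if history[i].get("role") == "user":
--             out.extend(history[i:end])
--             end = i
--     if history:
--         out.extend(history[0:end])
--     return out
-- ===== Notes on version B (the rewrite author's own statement) =====
-- stated objective: alternative
-- what changed: B replaces A's build-list-of-turns / reversed() / flatten pipeline with a single backward index scan that emits each turn as a slice history[start:end] as soon as its starting user message is found.
import Mathlib
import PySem

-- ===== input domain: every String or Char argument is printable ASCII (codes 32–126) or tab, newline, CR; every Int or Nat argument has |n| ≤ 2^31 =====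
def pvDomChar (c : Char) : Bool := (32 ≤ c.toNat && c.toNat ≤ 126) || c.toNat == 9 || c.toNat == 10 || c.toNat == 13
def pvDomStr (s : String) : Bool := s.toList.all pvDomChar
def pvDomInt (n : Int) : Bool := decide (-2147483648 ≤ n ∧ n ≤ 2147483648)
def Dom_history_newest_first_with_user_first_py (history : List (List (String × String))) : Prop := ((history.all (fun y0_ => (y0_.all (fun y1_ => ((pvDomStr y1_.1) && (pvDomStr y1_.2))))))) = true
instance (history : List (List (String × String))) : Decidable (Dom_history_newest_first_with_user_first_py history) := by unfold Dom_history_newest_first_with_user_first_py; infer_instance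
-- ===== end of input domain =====

-- B replaces A's build-list-of-turns / reversed() / flatten pipeline with a single backward
-- index scan emitting each turn as a slice history[start:end]; objective: alternative (same cost).

-- ===== PORT A =====
-- message.get("role"): first-match lookup in the association list (exact for Python dicts)
def pvGetRole : List (String × String) → Option String
  | [] => none
  | (k, v) :: rest => if k == "role" then some v else pvGetRole rest

-- the body of A's first loop (one iteration of `for message in history`)
def pvStepA (turns : List (List (List (String × String)))) (message : List (String × String)) :
    List (List (List (String × String))) :=
  if pvGetRole message == some "user" || turns.isEmpty then
    turns ++ [[message]]
  else
    turns.dropLast ++ [PySem.List.pyGetD turns (-1) [] ++ [message]]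

def history_newest_first_with_user_first_py (history : List (List (String × String))) :
    List (List (String × String)) :=
  let turns := history.foldl pvStepA []
  turns.reverse.foldl (fun ordered turn => ordered ++ turn) []

-- ===== PORT B =====
-- the body of B's backward loop (state = (out, end))
def pvStepB (history : List (List (String × String)))
    (st : List (List (String × String)) × Int) (i : Int) :
    List (List (String × String)) × Int :=
  if pvGetRole (PySem.List.pyGetD history i []) == some "user" then
    (st.1 ++ PySem.List.slice history (some i) (some st.2), i)
  else st

def history_newest_first_with_user_first_py_alt (history : List (List (String × String))) :
    List (List (String × String)) :=
  let n : Int := history.length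
  let r := (PySem.List.pyRange (n - 1) 0 (-1)).foldl (pvStepB history) ([], n)
  if history.isEmpty then r.1
  else r.1 ++ PySem.List.slice history (some 0) (some r.2)

-- ===== PRECONDITION & SPEC =====
def Spec_history_newest_first_with_user_first_py (history : List (List (String × String))) (out : List (List (String × String))) : Prop := out = history_newest_first_with_user_first_py_alt history
instance (history : List (List (String × String))) (out : List (List (String × String))) : Decidable (Spec_history_newest_first_with_user_first_py history out) := by unfold Spec_history_newest_first_with_user_first_py; infer_instance

-- ===== CLAIM (what is proved, stated in full; the proofs are below) =====
def Claim_equal_history_newest_first_with_user_first_py : Prop := ∀ (history : List (List (String × String))), Dom_history_newest_first_with_user_first_py history → Spec_history_newest_first_with_user_first_py history (history_newest_first_with_user_first_py history)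

-- ===== LEMMAS AND PROOFS =====

-- `pvU m` : the message starts a new turn (its "role" is "user")
def pvU (m : List (String × String)) : Bool := pvGetRole m == some "user"

-- the turn structure of a history: first message always opens a turn, every
-- user message opens a turn, other messages join the current turn
def pvGroups : List (List (String × String)) → List (List (List (String × String)))
  | [] => []
  | m :: r => (m :: r.takeWhile (fun x => !pvU x)) :: pvGroups (r.dropWhile (fun x => !pvU x))
termination_by l => l.length
decreasing_by
  simp only [List.length_cons]
  exact Nat.lt_succ_of_le (List.length_dropWhile_le _ _)

theorem pvFoldAppend (l : List (List (List (String × String))))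
    (acc : List (List (String × String))) :
    l.foldl (fun ordered turn => ordered ++ turn) acc = acc ++ l.flatten := by
  induction l generalizing acc with
  | nil => simp
  | cons t l ih => simp [List.foldl_cons, ih, List.append_assoc]

theorem pvFoldA (h : List (List (String × String))) :
    ∀ (ts : List (List (List (String × String)))) (last : List (List (String × String))),
      h.foldl pvStepA (ts ++ [last]) =
        ts ++ [last ++ h.takeWhile (fun x => !pvU x)] ++ pvGroups (h.dropWhile (fun x => !pvU x)) := by
  induction h with
  | nil => intro ts last; simp [pvGroups]
  | cons m r ih =>
    intro ts last
    rw [List.foldl_cons]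
    cases hum : pvU m with
    | true =>
      have hstep : pvStepA (ts ++ [last]) m = (ts ++ [last]) ++ [[m]] := by
        unfold pvStepA
        rw [show (pvGetRole m == some "user") = true from hum]
        simp
      rw [hstep, ih (ts ++ [last]) [m]]
      simp only [List.takeWhile_cons, List.dropWhile_cons, hum, Bool.not_true,
        Bool.false_eq_true, reduceIte]
      rw [pvGroups]
      simp
    | false =>
      have hstep : pvStepA (ts ++ [last]) m = ts ++ [last ++ [m]] := by
        unfold pvStepA
        rw [show (pvGetRole m == some "user") = false from hum]
        simp [PySem.List.pyGetD_neg_one_append_singleton]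
      rw [hstep, ih ts (last ++ [m])]
      simp only [List.takeWhile_cons, List.dropWhile_cons, hum, Bool.not_false, if_pos]
      simp [List.append_assoc]

theorem pvA_groups (h : List (List (String × String))) :
    history_newest_first_with_user_first_py h = ((pvGroups h).reverse).flatten := by
  unfold history_newest_first_with_user_first_py
  rw [pvFoldAppend, List.nil_append]
  congr 1
  cases h with
  | nil => simp [pvGroups]
  | cons m r =>
    rw [List.foldl_cons]
    have h0 : pvStepA [] m = [] ++ [[m]] := by unfold pvStepA; simp
    rw [h0, pvFoldA r [] [m], pvGroups]
    simp

theorem pvGroups_single (m : List (String × String)) (r : List (List (String × String)))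
    (hall : ∀ x ∈ r, pvU x = false) : pvGroups (m :: r) = [m :: r] := by
  rw [pvGroups]
  have ht : r.takeWhile (fun x => !pvU x) = r :=
    List.takeWhile_eq_self_iff.2 (fun x hx => by simp [hall x hx])
  have hd : r.dropWhile (fun x => !pvU x) = [] :=
    List.dropWhile_eq_nil_iff.2 (fun x hx => by simp [hall x hx])
  rw [ht, hd]
  simp [pvGroups]

theorem pvGroups_append_user (xs : List (List (String × String)))
    (u : List (String × String)) (rest : List (List (String × String)))
    (hu : pvU u = true) :
    pvGroups (xs ++ u :: rest) = pvGroups xs ++ pvGroups (u :: rest) := by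
  generalize hL : xs.length = L
  induction L using Nat.strong_induction_on generalizing xs with
  | _ L ih =>
    cases xs with
    | nil => simp [pvGroups]
    | cons m xs' =>
      rw [List.cons_append, pvGroups, pvGroups]
      by_cases hall : ∀ x ∈ xs', pvU x = false
      · have ht2 : xs'.takeWhile (fun x => !pvU x) = xs' :=
          List.takeWhile_eq_self_iff.2 (fun x hx => by simp [hall x hx])
        have hd2 : xs'.dropWhile (fun x => !pvU x) = [] :=
          List.dropWhile_eq_nil_iff.2 (fun x hx => by simp [hall x hx])
        rw [List.takeWhile_append, List.dropWhile_append]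
        rw [ht2, hd2]
        simp [pvGroups, hu]
      · have hne : xs'.takeWhile (fun x => !pvU x) ≠ xs' := by
          intro heq
          exact hall (fun x hx => by
            have := List.takeWhile_eq_self_iff.1 heq x hx
            simpa using this)
        have hlen : (xs'.takeWhile (fun x => !pvU x)).length ≠ xs'.length := by
          intro hl
          exact hne ((List.takeWhile_prefix _).eq_of_length hl)
        have hdne : xs'.dropWhile (fun x => !pvU x) ≠ [] := by
          intro hd
          exact hall (fun x hx => by
            have := List.dropWhile_eq_nil_iff.1 hd x hx
            simpa using this)
        rw [List.takeWhile_append, List.dropWhile_append]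
        rw [if_neg hlen, if_neg (by simpa using hdne)]
        rw [ih (xs'.dropWhile (fun x => !pvU x)).length
            (by
              have h1 := List.length_dropWhile_le (fun x => !pvU x) xs'
              simp only [← hL, List.length_cons]
              omega)
            _ rfl]
        simp

theorem pvB2 (h : List (List (String × String))) (i : Nat) :
    ∀ (e : Nat) (out : List (List (String × String))),
      i < e → e ≤ h.length →
      (∀ k, (hk : k < h.length) → i < k → k < e → pvU h[k] = false) →
      (let r := (PySem.List.pyRange (i : Int) 0 (-1)).foldl (pvStepB h) (out, (e : Int));
       r.1 ++ PySem.List.slice h (some 0) (some r.2)) =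
        out ++ ((pvGroups (h.take e)).reverse).flatten := by
  induction i with
  | zero =>
    intro e out hie hel hall
    dsimp only
    rw [PySem.List.pyRange_neg_one_eq_nil (by norm_num), List.foldl_nil]
    rw [PySem.List.slice_zero_start, PySem.List.slice_to_natCast]
    congr 1
    cases hte : h.take e with
    | nil =>
      exfalso
      have : (h.take e).length = e := by simp; omega
      rw [hte] at this
      simp at this
      omega
    | cons m r =>
      rw [pvGroups_single m r ?_]
      · simp
      · intro x hx
        obtain ⟨j, hj, hjx⟩ := List.mem_iff_getElem.1 hx
        have hjl : j + 1 < (h.take e).length := by rw [hte]; simp; omega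
        have hx' : x = h[j + 1]'(by simp at hjl; omega) := by
          rw [← hjx]
          have : (h.take e)[j + 1]'hjl = r[j] := by simp [hte]
          rw [← this, List.getElem_take]
        rw [hx']
        refine hall (j + 1) _ (by omega) ?_
        have : (h.take e).length ≤ e := by simp
        omega
  | succ i ihi =>
    intro e out hie hel hall
    have hlt : i + 1 < h.length := by omega
    dsimp only
    rw [PySem.List.pyRange_neg_one_cons (by exact_mod_cast Int.natCast_pos.2 (Nat.succ_pos i)),
      List.foldl_cons]
    have hcast : ((i + 1 : Nat) : Int) - 1 = ((i : Nat) : Int) := by push_cast; ring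
    rw [hcast]
    have hget : PySem.List.pyGetD h (((i + 1 : Nat) : Int)) [] = h[i + 1]'hlt :=
      PySem.List.pyGetD_ofNat h (i + 1) [] hlt
    cases huser : pvU (h[i + 1]'hlt) with
    | true =>
      have hstep : pvStepB h (out, (e : Int)) ((i + 1 : Nat) : Int) =
          (out ++ PySem.List.slice h (some ((i + 1 : Nat) : Int)) (some (e : Int)), ((i + 1 : Nat) : Int)) := by
        unfold pvStepB
        rw [hget]
        unfold pvU at huser
        simp [huser]
      rw [hstep]
      have := ihi (i + 1) (out ++ PySem.List.slice h (some ((i + 1 : Nat) : Int)) (some (e : Int)))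
        (Nat.lt_succ_self i) (by omega) (by intro k hk h1 h2; omega)
      dsimp only at this
      rw [this]
      rw [PySem.List.slice_natCast]
      have hdropc : h.drop (i + 1) = h[i + 1]'hlt :: h.drop (i + 2) := by
        rw [List.drop_eq_getElem_cons hlt]
      have hseg : (h.drop (i + 1)).take (e - (i + 1)) =
          (h[i + 1]'hlt) :: (h.drop (i + 2)).take (e - (i + 1) - 1) := by
        rw [hdropc]
        have : e - (i + 1) = (e - (i + 1) - 1) + 1 := by omega
        rw [this, List.take_succ_cons]
        simp
      have hsplit : h.take e = h.take (i + 1) ++ (h.drop (i + 1)).take (e - (i + 1)) := by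
        rw [← List.take_add]
        congr 1
        omega
      have hgrp : pvGroups (h.take e) =
          pvGroups (h.take (i + 1)) ++ [(h.drop (i + 1)).take (e - (i + 1))] := by
        rw [hsplit, hseg, pvGroups_append_user _ _ _ huser, pvGroups_single]
        intro x hx
        obtain ⟨j, hj, hjx⟩ := List.mem_iff_getElem.1 hx
        have hjl : j < (h.drop (i + 2)).length := by
          have hg : (h.drop (i + 2)).length = h.length - (i + 2) := by simp
          have h2 := hj
          simp at h2
          omega
        have hx' : x = h[i + 2 + j]'(by simp at hjl; omega) := by
          rw [← hjx]
          have h3 : ((h.drop (i + 2)).take (e - (i + 1) - 1))[j]'hj =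
              (h.drop (i + 2))[j]'hjl := List.getElem_take
          rw [h3, List.getElem_drop]
        have hj2 : j < e - (i + 1) - 1 := by
          have h2 := hj
          simp at h2
          omega
        rw [hx']
        exact hall (i + 2 + j) _ (by omega) (by omega)
      rw [hgrp]
      simp [List.reverse_append, List.append_assoc]
    | false =>
      have hstep : pvStepB h (out, (e : Int)) ((i + 1 : Nat) : Int) = (out, (e : Int)) := by
        unfold pvStepB
        rw [hget]
        unfold pvU at huser
        simp [huser]
      rw [hstep]
      have := ihi e out (by omega) hel (by
        intro k hk h1 h2
        by_cases hki : k = i + 1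
        · subst hki; exact huser
        · exact hall k hk (by omega) h2)
      dsimp only at this
      rw [this]

theorem pvB_groups (h : List (List (String × String))) :
    history_newest_first_with_user_first_py_alt h = ((pvGroups h).reverse).flatten := by
  cases h with
  | nil =>
    unfold history_newest_first_with_user_first_py_alt
    simp [pvGroups]
  | cons m r0 =>
    unfold history_newest_first_with_user_first_py_alt
    simp only [List.isEmpty_cons, Bool.false_eq_true, if_false, List.length_cons]
    have hc : ((r0.length + 1 : Nat) : Int) - 1 = ((r0.length : Nat) : Int) := by push_cast; ring
    rw [hc]
    have := pvB2 (m :: r0) r0.length (r0.length + 1) [] (Nat.lt_succ_self _)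
      (by simp) (by intro k hk h1 h2; omega)
    dsimp only at this
    rw [this, List.nil_append, List.take_of_length_le (by simp)]

-- ===== VERDICT (by name: the statement is the Claim_ definition above) =====
theorem history_newest_first_with_user_first_py_spec : Claim_equal_history_newest_first_with_user_first_py := by
  intro history _
  unfold Spec_history_newest_first_with_user_first_py
  rw [pvA_groups, pvB_groups]
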